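-- pv_equiv track=rewrite | github.com/le-eug/MATH3411 | test2/comma_code_decode.py | gen_comma_codes
-- ===== SOURCE A (Python) =====
-- def gen_comma_codes(length: int) -> list[str]:
--     codes: list[str] = []
--     for i in range(length + 1):
--         code: str = ''
--         for _ in range(i):
--             code += '1'
--
--         if i != length:
--             code += '0'
--
--         codes.append(code)
--
--     return codes
-- ===== SOURCE B (Python) =====
-- def gen_comma_codes(length: int) -> list[str]:
--     if length < 0:
--         return []
--     return ['1' * i + '0' for i in range(length)] + ['1' * length]
-- ===== Notes on version B (the rewrite author's own statement) =====
-- stated objective: simpler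
-- what changed: B replaces A's accumulator loop with an inner character-by-character append loop by a single closed-form list comprehension ('1'*i + '0' for i < length, plus '1'*length as the last code), with the negative-length case returning [] up front.
import Mathlib
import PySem

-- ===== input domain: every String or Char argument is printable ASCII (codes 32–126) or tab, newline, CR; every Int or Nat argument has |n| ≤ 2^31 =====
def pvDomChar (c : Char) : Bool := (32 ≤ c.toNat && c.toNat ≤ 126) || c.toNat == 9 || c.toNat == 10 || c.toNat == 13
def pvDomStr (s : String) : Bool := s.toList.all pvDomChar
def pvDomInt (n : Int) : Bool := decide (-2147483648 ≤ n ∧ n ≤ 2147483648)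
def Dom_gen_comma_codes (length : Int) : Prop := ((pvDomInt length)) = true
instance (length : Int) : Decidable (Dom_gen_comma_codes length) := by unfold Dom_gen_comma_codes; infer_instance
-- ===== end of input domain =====

-- B replaces A's append loop with inner character loop by a closed-form list comprehension
-- ('1'*i + '0' for i < length, plus '1'*length); objective: simpler.

-- ===== PORT A =====
def gen_comma_codes (length : Int) : List String :=
  (PySem.List.pyRange 0 (length + 1) 1).foldl (fun codes i =>
    codes ++ [(fun code => if i ≠ length then code ++ "0" else code)
      ((PySem.List.pyRange 0 i 1).foldl (fun c _ => c ++ "1") "")]) []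

-- ===== PORT B =====
-- '1' * i (i ≥ 0 here) is ported as String.ofList (List.replicate i.toNat '1'); exact, since
-- Python string repetition with a nonnegative count is exactly i copies of the character.
def gen_comma_codes_alt (length : Int) : List String :=
  if length < 0 then []
  else
    (PySem.List.pyRange 0 length 1).map
      (fun i => String.ofList (List.replicate i.toNat '1') ++ "0")
    ++ [String.ofList (List.replicate length.toNat '1')]

-- ===== PRECONDITION & SPEC =====
def Spec_gen_comma_codes (length : Int) (out : List String) : Prop := out = gen_comma_codes_alt length
instance (length : Int) (out : List String) : Decidable (Spec_gen_comma_codes length out) := by unfold Spec_gen_comma_codes; infer_instance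

-- ===== CLAIM (what is proved, stated in full; the proofs are below) =====
def Claim_equal_gen_comma_codes : Prop := ∀ (length : Int), Dom_gen_comma_codes length → Spec_gen_comma_codes length (gen_comma_codes length)

-- ===== LEMMAS AND PROOFS =====

theorem ones_foldl (l : List Int) (s : String) :
    l.foldl (fun c _ => c ++ "1") s = s ++ String.ofList (List.replicate l.length '1') := by
  induction l generalizing s with
  | nil => simp
  | cons x xs ih =>
      rw [List.foldl_cons, ih, List.length_cons, List.replicate_succ,
        show ('1' :: List.replicate xs.length '1') = ['1'] ++ List.replicate xs.length '1' from rfl,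
        String.ofList_append, ← String.append_assoc]

-- ===== VERDICT (by name: the statement is the Claim_ definition above) =====
theorem gen_comma_codes_spec : Claim_equal_gen_comma_codes := by
  intro length _
  unfold Spec_gen_comma_codes gen_comma_codes gen_comma_codes_alt
  by_cases hneg : length < 0
  · rw [PySem.List.pyRange_one_eq_nil (by omega)]
    simp [hneg]
  · rw [Int.not_lt] at hneg
    rw [if_neg (by omega)]
    rw [PySem.List.foldl_append_singleton_eq_map]
    rw [PySem.List.pyRange_one_succ_right hneg, List.map_append]
    simp only [List.nil_append, List.map_cons, List.map_nil]
    congr 1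
    · refine List.map_congr_left ?_
      intro i hi
      rw [PySem.List.mem_pyRange_one] at hi
      rw [if_pos (by omega), ones_foldl]
      simp [PySem.List.length_pyRange_one]
    · rw [if_neg (by simp), ones_foldl]
      simp [PySem.List.length_pyRange_one]
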